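-- pv_equiv track=rewrite | github.com/liyw0205/nonebot_plugin_xiuxian_2_pmv | nonebot_plugin_xiuxian_2/xiuxian/xiuxian_game/games/gomoku.py | coordinate_to_position
-- ===== SOURCE A (Python) =====
-- BOARD_SIZE = 15  # 15x15 棋盘
--
-- def coordinate_to_position(coord: str) -> tuple:
--     """将坐标转换为棋盘位置"""
--     if len(coord) < 2:
--         return None
--
--     try:
--         # 处理字母坐标（A-Z, AA-AZ等）
--         col_str = ''
--         row_str = ''
--
--         for char in coord:
--             if char.isalpha():
--                 col_str += char.upper()
--             elif char.isdigit():
--                 row_str += char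
--
--         if not col_str or not row_str:
--             return None
--
--         # 将字母转换为数字（A=0, B=1, ..., Z=25, AA=26, AB=27, ...）
--         col = 0
--         for i, char in enumerate(reversed(col_str)):
--             col += (ord(char) - ord('A') + 1) * (26 ** i)
--         col -= 1  # 调整为0-based
--
--         row = int(row_str) - 1  # 调整为0-based
--
--         if 0 <= col < BOARD_SIZE and 0 <= row < BOARD_SIZE:
--             return (col, row)
--         else:
--             return None
--
--     except:
--         return None
-- ===== SOURCE B (Python) =====
-- BOARD_SIZE = 15  # 15x15 棋盘
--
-- def coordinate_to_position(coord: str) -> tuple: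
--     """将坐标转换为棋盘位置 — single fused pass with Horner accumulators"""
--     if len(coord) < 2:
--         return None
--     col = 0
--     row = 0
--     seen_col = False
--     seen_row = False
--     for ch in coord:
--         if ch.isalpha():
--             col = col * 26 + (ord(ch.upper()) - ord('A') + 1)
--             seen_col = True
--         elif ch.isdigit():
--             row = row * 10 + (ord(ch) - ord('0'))
--             seen_row = True
--     if not (seen_col and seen_row):
--         return None
--     col -= 1
--     row -= 1
--     if 0 <= col < BOARD_SIZE and 0 <= row < BOARD_SIZE:
--         return (col, row)
--     return None
-- ===== Notes on version B (the rewrite author's own statement) =====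
-- stated objective: simpler
-- what changed: Replaces A's three passes (build col_str/row_str strings, then a separate enumerate(reversed)-with-26**i power loop, then int(row_str)) by one fused pass keeping integer Horner accumulators col/row and two seen flags; no intermediate strings, no power computation, no int() parse, no try/except.
import Mathlib
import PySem

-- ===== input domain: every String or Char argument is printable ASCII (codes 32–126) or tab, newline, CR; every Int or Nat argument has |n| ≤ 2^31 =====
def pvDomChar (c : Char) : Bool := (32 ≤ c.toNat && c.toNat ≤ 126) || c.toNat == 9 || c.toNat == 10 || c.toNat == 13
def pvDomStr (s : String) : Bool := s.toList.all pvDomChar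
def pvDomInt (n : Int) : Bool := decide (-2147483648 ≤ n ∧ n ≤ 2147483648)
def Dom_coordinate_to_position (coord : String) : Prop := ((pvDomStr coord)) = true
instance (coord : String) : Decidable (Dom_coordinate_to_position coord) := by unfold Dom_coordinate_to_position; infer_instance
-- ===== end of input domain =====

-- B replaces A's three passes (build col_str/row_str, a separate enumerate(reversed) power
-- loop, int(row_str)) by one fused pass with Horner accumulators and seen-flags (simpler).

-- ===== PORT A =====
-- the classification loop: for char in coord: append char.upper() to col_str / char to row_str
def aClassify (st : List Char × List Char) (c : Char) : List Char × List Char :=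
  if PySem.Chars.isalpha c then (st.1 ++ [PySem.Chars.upperChar c], st.2)
  else if PySem.Chars.isdigit c then (st.1, st.2 ++ [c])
  else st

-- 'for i, char in enumerate(reversed(col_str)): col += (ord(char)-ord('A')+1) * 26**i'
def aColLoop : List Char → Nat → Int → Int
  | [], _, col => col
  | c :: rest, i, col => aColLoop rest (i + 1) (col + ((c.toNat : Int) - 65 + 1) * 26 ^ i)

-- hand port of int(row_str): exact for the nonempty ASCII-digit strings row_str always is here
def aIntDigits (ds : List Char) : Int :=
  ds.foldl (fun a c => a * 10 + ((c.toNat : Int) - 48)) 0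

def coordinate_to_position (coord : String) : Option (Int × Int) :=
  let l := coord.toList
  if l.length < 2 then none
  else
    let st := l.foldl aClassify ([], [])
    if st.1 = [] ∨ st.2 = [] then none
    else
      let col := aColLoop st.1.reverse 0 0 - 1
      let row := aIntDigits st.2 - 1
      if 0 ≤ col ∧ col < 15 ∧ 0 ≤ row ∧ row < 15 then some (col, row) else none

-- ===== PORT B =====
-- fused pass: state (col, row, seen_col, seen_row), Horner accumulation
def bStep (st : Int × Int × Bool × Bool) (c : Char) : Int × Int × Bool × Bool :=
  if PySem.Chars.isalpha c then
    (st.1 * 26 + (((PySem.Chars.upperChar c).toNat : Int) - 65 + 1), st.2.1, true, st.2.2.2)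
  else if PySem.Chars.isdigit c then
    (st.1, st.2.1 * 10 + (((c.toNat : Int)) - 48), st.2.2.1, true)
  else st

def coordinate_to_position_alt (coord : String) : Option (Int × Int) :=
  let l := coord.toList
  if l.length < 2 then none
  else
    let st := l.foldl bStep (0, 0, false, false)
    if st.2.2.1 && st.2.2.2 then
      let col := st.1 - 1
      let row := st.2.1 - 1
      if 0 ≤ col ∧ col < 15 ∧ 0 ≤ row ∧ row < 15 then some (col, row) else none
    else none

-- ===== PRECONDITION & SPEC =====
def Spec_coordinate_to_position (coord : String) (out : Option (Int × Int)) : Prop := out = coordinate_to_position_alt coord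
instance (coord : String) (out : Option (Int × Int)) : Decidable (Spec_coordinate_to_position coord out) := by unfold Spec_coordinate_to_position; infer_instance

-- ===== CLAIM (what is proved, stated in full; the proofs are below) =====
def Claim_equal_coordinate_to_position : Prop := ∀ (coord : String), Dom_coordinate_to_position coord → Spec_coordinate_to_position coord (coordinate_to_position coord)

-- ===== LEMMAS AND PROOFS =====

-- big-endian Horner value of a (already-uppercased) letter list, as B accumulates it
def horner26 (cs : List Char) : Int :=
  cs.foldl (fun a c => a * 26 + ((c.toNat : Int) - 64)) 0

-- little-endian value, matching A's reversed-with-powers loop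
def revVal : List Char → Int
  | [] => 0
  | c :: rest => ((c.toNat : Int) - 64) + 26 * revVal rest

lemma aColLoop_eq (l : List Char) : ∀ (i : Nat) (acc : Int),
    aColLoop l i acc = acc + 26 ^ i * revVal l := by
  induction l with
  | nil => intro i acc; simp [aColLoop, revVal]
  | cons c rest ih =>
    intro i acc
    simp only [aColLoop, revVal, ih]
    ring

lemma revVal_append (xs : List Char) (c : Char) :
    revVal (xs ++ [c]) = revVal xs + ((c.toNat : Int) - 64) * 26 ^ xs.length := by
  induction xs with
  | nil => simp [revVal]
  | cons d rest ih => simp [revVal, ih]; ring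

lemma horner26_foldl (cs : List Char) : ∀ (a : Int),
    cs.foldl (fun a c => a * 26 + ((c.toNat : Int) - 64)) a
      = a * 26 ^ cs.length + revVal cs.reverse := by
  induction cs with
  | nil => intro a; simp [revVal]
  | cons c rest ih =>
    intro a
    simp only [List.foldl_cons, ih, List.reverse_cons, revVal_append, List.length_reverse,
      List.length_cons]
    ring

lemma aColLoop_horner (cs : List Char) :
    aColLoop cs.reverse 0 0 = horner26 cs := by
  simp [aColLoop_eq, horner26, horner26_foldl]

-- the fused B loop simulates A's classification loop
lemma fused_inv (l : List Char) : ∀ (cs rs : List Char),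
    l.foldl bStep (horner26 cs, aIntDigits rs, !cs.isEmpty, !rs.isEmpty)
      = ((l.foldl aClassify (cs, rs)).1.foldl (fun a c => a * 26 + ((c.toNat : Int) - 64)) 0,
         aIntDigits (l.foldl aClassify (cs, rs)).2,
         !(l.foldl aClassify (cs, rs)).1.isEmpty,
         !(l.foldl aClassify (cs, rs)).2.isEmpty) := by
  induction l with
  | nil => intro cs rs; simp [horner26]
  | cons c rest ih =>
    intro cs rs
    by_cases ha : PySem.Chars.isalpha c = true
    · have h1 : bStep (horner26 cs, aIntDigits rs, !cs.isEmpty, !rs.isEmpty) c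
          = (horner26 (cs ++ [PySem.Chars.upperChar c]), aIntDigits rs,
             !(cs ++ [PySem.Chars.upperChar c]).isEmpty, !rs.isEmpty) := by
        simp [bStep, ha, horner26, List.foldl_append]
        omega
      simp only [List.foldl_cons, h1, ih, aClassify, ha, if_pos]
    · by_cases hd : PySem.Chars.isdigit c = true
      · have h1 : bStep (horner26 cs, aIntDigits rs, !cs.isEmpty, !rs.isEmpty) c
            = (horner26 cs, aIntDigits (rs ++ [c]),
               !cs.isEmpty, !(rs ++ [c]).isEmpty) := by
          simp [bStep, ha, hd, aIntDigits, List.foldl_append]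
        simp only [List.foldl_cons, h1, ih, aClassify, ha, hd, if_neg, if_pos,
          Bool.false_eq_true, not_false_iff]
      · have h1 : bStep (horner26 cs, aIntDigits rs, !cs.isEmpty, !rs.isEmpty) c
            = (horner26 cs, aIntDigits rs, !cs.isEmpty, !rs.isEmpty) := by
          simp [bStep, ha, hd]
        simp only [List.foldl_cons, h1, ih, aClassify, ha, hd, if_neg,
          Bool.false_eq_true, not_false_iff]

-- ===== VERDICT (by name: the statement is the Claim_ definition above) =====
theorem coordinate_to_position_spec : Claim_equal_coordinate_to_position := by
  intro coord _
  unfold Spec_coordinate_to_position coordinate_to_position coordinate_to_position_alt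
  dsimp only
  by_cases hl : coord.toList.length < 2
  · rw [if_pos hl, if_pos hl]
  · rw [if_neg hl, if_neg hl]
    have h : coord.toList.foldl bStep (0, 0, false, false)
        = ((coord.toList.foldl aClassify ([], [])).1.foldl
             (fun a c => a * 26 + ((c.toNat : Int) - 64)) 0,
           aIntDigits (coord.toList.foldl aClassify ([], [])).2,
           !(coord.toList.foldl aClassify ([], [])).1.isEmpty,
           !(coord.toList.foldl aClassify ([], [])).2.isEmpty) := by
      simpa [horner26, aIntDigits] using fused_inv coord.toList [] []
    rw [h]
    rcases hst : coord.toList.foldl aClassify ([], []) with ⟨cs, rs⟩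
    rcases cs with _ | ⟨c, cs'⟩
    · simp
    · rcases rs with _ | ⟨r, rs'⟩
      · simp
      · simp only [List.isEmpty_cons, Bool.not_false, Bool.and_self, if_true,
          reduceCtorEq, or_self, if_neg, not_false_iff]
        rw [aColLoop_horner]
        rfl
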